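-- pv_equiv track=rewrite | github.com/vladsmailov/social_capital | parser.py | get_node_size
-- ===== SOURCE A (Python) =====
-- def get_node_size(edges, nodes):
--     """Задание массы узла в зависимости от количества связей"""
--     sizes = {}
--     for node in nodes:
--         node -= 1
--         sizes[node] = 5
--     for edge in edges:
--         node_number = edge[1]-1
--         if node_number in sizes:
--             sizes[node_number] += 1
--         else:
--             pass
--     return sizes
-- ===== SOURCE B (Python) =====
-- def get_node_size(edges, nodes):
--     """Задание массы узла в зависимости от количества связей"""
--     return {node - 1: 5 + sum(1 for edge in edges if edge[1] - 1 == node - 1)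
--             for node in nodes}
-- ===== Notes on version B (the rewrite author's own statement) =====
-- stated objective: alternative
-- what changed: B abandons A's two-phase mutable-dict scheme (initialise every node to 5, then conditionally increment while scanning edges) and instead computes each node's final size directly in one dict comprehension, counting that node's incoming edges with an inner scan; no membership test and no in-place update remain. It trades O(n+m) for O(n*m).
import Mathlib
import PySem

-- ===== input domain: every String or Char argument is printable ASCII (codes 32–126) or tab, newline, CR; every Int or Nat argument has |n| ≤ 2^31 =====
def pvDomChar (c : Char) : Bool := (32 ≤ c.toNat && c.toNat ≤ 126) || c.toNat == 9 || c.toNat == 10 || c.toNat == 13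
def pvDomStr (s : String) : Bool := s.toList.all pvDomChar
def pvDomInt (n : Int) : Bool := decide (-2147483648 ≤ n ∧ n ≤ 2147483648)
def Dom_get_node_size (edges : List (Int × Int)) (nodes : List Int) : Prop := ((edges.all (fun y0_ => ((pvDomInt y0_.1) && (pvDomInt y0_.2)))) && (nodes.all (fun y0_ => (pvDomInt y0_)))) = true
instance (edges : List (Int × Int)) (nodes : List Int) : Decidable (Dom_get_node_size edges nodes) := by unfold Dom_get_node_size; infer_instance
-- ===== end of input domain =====

-- B drops A's two-phase mutable-dict scheme and computes each node's size directly,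
-- counting that node's incoming edges with an inner scan (alternative algorithm, O(n*m)).

-- ===== PORT A =====
def get_node_size (edges : List (Int × Int)) (nodes : List Int) : List (Int × Int) :=
  let sizes : PySem.Dict Int Int :=
    nodes.foldl (fun s node => s.insert (node - 1) 5) PySem.Dict.empty
  let sizes :=
    edges.foldl (fun s edge =>
      if s.contains (edge.2 - 1) then s.insert (edge.2 - 1) (s.getD (edge.2 - 1) 0 + 1) else s)
      sizes
  sizes.items

-- ===== PORT B =====
-- the dict comprehension: one insert per node, value computed by the inner edge scan
def get_node_size_alt (edges : List (Int × Int)) (nodes : List Int) : List (Int × Int) :=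
  (nodes.foldl (fun s node =>
      s.insert (node - 1)
        (5 + edges.foldl (fun acc edge => if edge.2 - 1 = node - 1 then acc + 1 else acc) 0))
    (PySem.Dict.empty : PySem.Dict Int Int)).items

-- ===== PRECONDITION & SPEC =====
def Spec_get_node_size (edges : List (Int × Int)) (nodes : List Int) (out : List (Int × Int)) : Prop := out = get_node_size_alt edges nodes
instance (edges : List (Int × Int)) (nodes : List Int) (out : List (Int × Int)) : Decidable (Spec_get_node_size edges nodes out) := by unfold Spec_get_node_size; infer_instance

-- ===== CLAIM (what is proved, stated in full; the proofs are below) =====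
def Claim_equal_get_node_size : Prop := ∀ (edges : List (Int × Int)) (nodes : List Int), Dom_get_node_size edges nodes → Spec_get_node_size edges nodes (get_node_size edges nodes)

-- ===== LEMMAS AND PROOFS =====

-- A's edge loop only touches existing keys, so it preserves the key list.
lemma keys_edgefold (edges : List (Int × Int)) (d : PySem.Dict Int Int) :
    (edges.foldl (fun s edge =>
      if s.contains (edge.2 - 1) then s.insert (edge.2 - 1) (s.getD (edge.2 - 1) 0 + 1) else s)
      d).keys = d.keys := by
  induction edges generalizing d with
  | nil => rfl
  | cons e es ih =>
    simp only [List.foldl_cons]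
    by_cases h : d.contains (e.2 - 1) = true
    · rw [if_pos h, ih, PySem.Dict.keys_insert_of_contains d _ h]
    · have h' : d.contains (e.2 - 1) = false := by simpa using h
      rw [if_neg (by simp [h']), ih]

-- value of A's edge loop: each contained key gains the number of edges targeting it
lemma getD_edgefold (edges : List (Int × Int)) (d : PySem.Dict Int Int) (k : Int) :
    (edges.foldl (fun s edge =>
      if s.contains (edge.2 - 1) then s.insert (edge.2 - 1) (s.getD (edge.2 - 1) 0 + 1) else s)
      d).getD k 0 =
    d.getD k 0 + (if d.contains k then ((edges.map (fun e => e.2 - 1)).count k : Int) else 0) := by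
  induction edges generalizing d with
  | nil => simp
  | cons e es ih =>
    simp only [List.foldl_cons, List.map_cons]
    by_cases h : d.contains (e.2 - 1) = true
    · rw [if_pos h, ih]
      by_cases hk : k = e.2 - 1
      · subst hk
        rw [PySem.Dict.getD_insert_self,
          show (d.insert (e.2 - 1) (d.getD (e.2 - 1) 0 + 1)).contains (e.2 - 1) = true by
            simp,
          List.count_cons_self, if_pos h, if_pos rfl]
        push_cast
        ring
      · rw [PySem.Dict.getD_insert_of_ne d _ _ hk,
          show (d.insert (e.2 - 1) (d.getD (e.2 - 1) 0 + 1)).contains k = d.contains k by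
            simp [PySem.Dict.contains_insert, hk]]
        have hk' : ¬ e.2 - 1 = k := fun hh => hk hh.symm
        simp [hk']
    · have h' : d.contains (e.2 - 1) = false := by simpa using h
      rw [if_neg (by simp [h']), ih]
      by_cases hk : k = e.2 - 1
      · subst hk; simp [h']
      · have hk' : ¬ e.2 - 1 = k := fun hh => hk hh.symm
        simp [hk']

-- A's first loop: every listed node's key holds 5
lemma getD_nodefold5 (nodes : List Int) (d : PySem.Dict Int Int) (k : Int) :
    (nodes.foldl (fun s node => s.insert (node - 1) 5) d).getD k 0 =
      if k ∈ nodes.map (fun n => n - 1) then (5 : Int) else d.getD k 0 := by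
  induction nodes generalizing d with
  | nil => simp
  | cons n ns ih =>
    simp only [List.foldl_cons, List.map_cons, List.mem_cons]
    rw [ih]
    by_cases hk : k ∈ ns.map (fun n => n - 1)
    · simp [hk]
    · by_cases hkn : k = n - 1
      · subst hkn; simp [hk, PySem.Dict.getD_insert_self]
      · simp [hk, hkn, PySem.Dict.getD_insert_of_ne d _ _ hkn]

-- B's loop inserts f (node-1) at key node-1: the value depends only on the key,
-- so rewrites by duplicate nodes do not change it
lemma getD_nodefoldB (f : Int → Int) (nodes : List Int) (d : PySem.Dict Int Int) (k : Int) :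
    (nodes.foldl (fun s node => s.insert (node - 1) (f (node - 1))) d).getD k 0 =
      if k ∈ nodes.map (fun n => n - 1) then f k else d.getD k 0 := by
  induction nodes generalizing d with
  | nil => simp
  | cons n ns ih =>
    simp only [List.foldl_cons, List.map_cons, List.mem_cons]
    rw [ih]
    by_cases hk : k ∈ ns.map (fun n => n - 1)
    · simp [hk]
    · by_cases hkn : k = n - 1
      · subst hkn; simp [hk, PySem.Dict.getD_insert_self]
      · simp [hk, hkn, PySem.Dict.getD_insert_of_ne d _ _ hkn]

-- the key lists produced by the two node loops agree: they depend only on the start keys, not the values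
lemma keys_nodefold (f : Int → Int) (nodes : List Int) (d d' : PySem.Dict Int Int)
    (h : d.keys = d'.keys) :
    (nodes.foldl (fun s node => s.insert (node - 1) 5) d).keys =
    (nodes.foldl (fun s node => s.insert (node - 1) (f (node - 1))) d').keys := by
  induction nodes generalizing d d' with
  | nil => simpa using h
  | cons n ns ih =>
    simp only [List.foldl_cons]
    apply ih
    have hc : d.contains (n - 1) = d'.contains (n - 1) := by
      rw [Bool.eq_iff_iff, PySem.Dict.contains_iff_mem_keys, PySem.Dict.contains_iff_mem_keys, h]
    cases hb : d.contains (n - 1) with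
    | true =>
      rw [PySem.Dict.keys_insert_of_contains d _ hb,
        PySem.Dict.keys_insert_of_contains d' _ (hc ▸ hb), h]
    | false =>
      rw [PySem.Dict.keys_insert_of_not_contains d _ hb,
        PySem.Dict.keys_insert_of_not_contains d' _ (hc ▸ hb), h]

lemma mem_keys_nodefold5 (nodes : List Int) (d : PySem.Dict Int Int) (k : Int) :
    k ∈ (nodes.foldl (fun s node => s.insert (node - 1) 5) d).keys ↔
      k ∈ nodes.map (fun n => n - 1) ∨ k ∈ d.keys := by
  induction nodes generalizing d with
  | nil => simp
  | cons n ns ih =>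
    simp only [List.foldl_cons, List.map_cons, List.mem_cons]
    rw [ih, PySem.Dict.mem_keys_insert]
    tauto

lemma nodup_keys_nodefold5 (nodes : List Int) (d : PySem.Dict Int Int)
    (h : d.keys.Nodup) :
    (nodes.foldl (fun s node => s.insert (node - 1) 5) d).keys.Nodup := by
  induction nodes generalizing d with
  | nil => simpa using h
  | cons n ns ih =>
    exact ih _ (PySem.Dict.nodup_keys_insert _ _ _ h)

-- B's inner scan counts the edges targeting k
lemma innerfold_count (edges : List (Int × Int)) (k : Int) (a : Int) :
    edges.foldl (fun acc edge => if edge.2 - 1 = k then acc + 1 else acc) a =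
      a + ((edges.map (fun e => e.2 - 1)).count k : Int) := by
  induction edges generalizing a with
  | nil => simp
  | cons e es ih =>
    simp only [List.foldl_cons, List.map_cons]
    by_cases h : e.2 - 1 = k
    · rw [if_pos h, ih, h, List.count_cons_self]
      push_cast; ring
    · rw [if_neg h, ih, List.count_cons_of_ne (by simpa using h)]

-- ===== VERDICT (by name: the statement is the Claim_ definition above) =====
theorem get_node_size_spec : Claim_equal_get_node_size := by
  intro edges nodes _
  unfold Spec_get_node_size
  dsimp only [get_node_size, get_node_size_alt]
  set f : Int → Int := fun k =>
    5 + edges.foldl (fun acc edge => if edge.2 - 1 = k then acc + 1 else acc) 0 with hf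
  set d5 : PySem.Dict Int Int :=
    nodes.foldl (fun s node => s.insert (node - 1) 5) PySem.Dict.empty with hd5
  set dA : PySem.Dict Int Int :=
    edges.foldl (fun s edge =>
      if s.contains (edge.2 - 1) then s.insert (edge.2 - 1) (s.getD (edge.2 - 1) 0 + 1) else s)
      d5 with hdA
  set dB : PySem.Dict Int Int :=
    nodes.foldl (fun s node => s.insert (node - 1) (f (node - 1))) PySem.Dict.empty with hdB
  have hkA : dA.keys = d5.keys := keys_edgefold edges d5
  have hkeys : dA.keys = dB.keys := by
    rw [hkA, hd5, hdB]
    exact keys_nodefold f nodes _ _ rfl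
  have hndA : dA.keys.Nodup := by
    rw [hkA, hd5]
    exact nodup_keys_nodefold5 nodes _ (by rw [PySem.Dict.keys_empty]; exact List.nodup_nil)
  have hndB : dB.keys.Nodup := hkeys ▸ hndA
  rw [PySem.Dict.items_eq_map_keys dA hndA 0, PySem.Dict.items_eq_map_keys dB hndB 0, ← hkeys]
  apply List.map_congr_left
  intro k hk
  have hkmem : k ∈ nodes.map (fun n => n - 1) := by
    have hmem := (mem_keys_nodefold5 nodes PySem.Dict.empty k).mp (by rw [← hd5, ← hkA]; exact hk)
    simpa [PySem.Dict.keys_empty] using hmem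
  have hc5 : d5.contains k = true :=
    (PySem.Dict.contains_iff_mem_keys _ _).mpr (hkA ▸ hk)
  have hA : dA.getD k 0 = 5 + ((edges.map (fun e => e.2 - 1)).count k : Int) := by
    rw [hdA, getD_edgefold, if_pos hc5, hd5, getD_nodefold5, if_pos hkmem]
  have hB : dB.getD k 0 = 5 + ((edges.map (fun e => e.2 - 1)).count k : Int) := by
    rw [hdB, getD_nodefoldB, if_pos hkmem, hf]
    simp [innerfold_count edges k 0]
  rw [hA, hB]
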